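-- pv_equiv track=rewrite | github.com/czgray/rootlab | src/rootlab/deprecated/20251105/graph.py | merge_end_links
-- ===== SOURCE A (Python) =====
-- from typing import Iterable, Mapping, Any, Dict, List, Set, Tuple
--
-- def merge_end_links(start_seg: str, end_map: Mapping[str, list[str]], visited: Set[str]) -> Set[str]:
--     """Return the full connected set (group) reachable via end_to_end links from start_seg."""
--     stack = [start_seg]
--     group: Set[str] = set()
--     while stack:
--         s = stack.pop()
--         if s in visited:
--             continue
--         visited.add(s)
--         group.add(s)
--         for nbr in end_map.get(s, []):
--             if nbr not in visited:
--                 stack.append(nbr)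
--     return group
-- ===== SOURCE B (Python) =====
-- # B: pure recursive DFS that RETURNS the visit order as a list instead of mutating a
-- # shared visited set during an explicit-stack loop; `visited` is only updated once at
-- # the end (same final visited state as A; equivalence proved is about the return value).
-- def merge_end_links(start_seg, end_map, visited):
--     def dfs(s, seen):
--         # visit order of the DFS from s given already-seen nodes; neighbours are
--         # explored last-to-first, acc collects newly visited nodes
--         if s in seen:
--             return []
--         acc = [s]
--         nbrs = end_map[s] if s in end_map else []
--         for nbr in reversed(nbrs):
--             acc = acc + dfs(nbr, seen + acc)
--         return acc
--     order = dfs(start_seg, list(visited))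
--     visited.update(order)
--     return set(order)
-- ===== Notes on version B (the rewrite author's own statement) =====
-- stated objective: alternative
-- what changed: Replaces A's imperative while-loop over an explicit work stack mutating shared visited/group sets by a pure recursive DFS dfs(s, seen) that returns the list of newly visited nodes in visit order (neighbours explored last-to-first, matching A's stack pops); the group is set(order) and visited is updated once at the end.
import Mathlib
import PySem

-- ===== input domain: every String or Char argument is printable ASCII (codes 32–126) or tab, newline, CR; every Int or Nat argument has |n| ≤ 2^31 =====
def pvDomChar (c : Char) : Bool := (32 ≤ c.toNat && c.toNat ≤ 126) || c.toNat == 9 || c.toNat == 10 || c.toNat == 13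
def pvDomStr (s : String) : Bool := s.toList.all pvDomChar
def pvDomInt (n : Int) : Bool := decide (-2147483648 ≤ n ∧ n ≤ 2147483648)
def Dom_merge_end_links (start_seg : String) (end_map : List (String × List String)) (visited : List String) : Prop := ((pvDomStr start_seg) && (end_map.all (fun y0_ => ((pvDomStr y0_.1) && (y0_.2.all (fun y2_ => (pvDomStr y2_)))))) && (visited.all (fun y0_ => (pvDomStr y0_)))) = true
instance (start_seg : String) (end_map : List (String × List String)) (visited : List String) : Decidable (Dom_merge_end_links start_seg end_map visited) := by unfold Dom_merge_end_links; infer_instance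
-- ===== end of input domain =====

-- B replaces A's explicit-stack loop mutating shared visited/group sets by a pure
-- recursive DFS that returns the visit order as a list; like A, the Python B leaves
-- `visited` updated with the group — the equivalence proved is about the return value.


-- Termination measure for A's port: how many map keys (with multiplicity) are not yet
-- in the visited set.  The lemmas below it are cited by `decreasing_by`.
def pvUnvis (end_map : List (String × List String)) (v : List String) : Nat :=
  ((end_map.map Prod.fst).filter (fun k => !(PySem.Set.contains v k))).length

lemma pvUnvis_filt_lt {p q : String → Bool} (hpq : ∀ x, p x → q x) :
    ∀ (l : List String) (s : String), s ∈ l → p s = false → q s = true →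
      (l.filter p).length < (l.filter q).length := by
  intro l
  induction l with
  | nil => intro s hs; cases hs
  | cons a l ih =>
    intro s hs hp hq
    rcases List.mem_cons.mp hs with h | h
    · subst h
      simp only [List.filter_cons, hp, hq, if_true, Bool.false_eq_true, if_false,
        List.length_cons]
      have : List.Sublist (l.filter p) (l.filter q) := List.monotone_filter_right _ hpq
      exact Nat.lt_succ_of_le this.length_le
    · by_cases hpa : p a = true
      · have hqa : q a = true := hpq a hpa
        simp only [List.filter_cons, hpa, hqa, if_true, List.length_cons]
        exact Nat.succ_lt_succ (ih s h hp hq)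
      · have h1 := ih s h hp hq
        simp only [List.filter_cons, Bool.not_eq_true] at *
        rw [hpa]
        by_cases hqa : q a = true <;> simp [hqa] <;> omega

lemma pvUnvis_add_lt (end_map : List (String × List String)) (v : List String)
    (s : String) (hk : s ∈ end_map.map Prod.fst) (hv : s ∉ v) :
    pvUnvis end_map (v ++ [s]) < pvUnvis end_map v := by
  refine pvUnvis_filt_lt ?_ _ s hk ?_ ?_
  · intro x hx
    simp only [PySem.Set.contains, Bool.not_eq_eq_eq_not, Bool.not_true,
      List.contains_eq_mem, decide_eq_false_iff_not] at hx ⊢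
    exact fun hxv => hx (List.mem_append_left _ hxv)
  · simp [PySem.Set.contains]
  · simp [PySem.Set.contains, hv]

lemma pvUnvis_add_eq (end_map : List (String × List String)) (v : List String)
    (s : String) (hk : s ∉ end_map.map Prod.fst) :
    pvUnvis end_map (v ++ [s]) = pvUnvis end_map v := by
  unfold pvUnvis
  refine congrArg _ (List.filter_congr ?_)
  intro k hkmem
  have hne : k ≠ s := fun h => hk (h ▸ hkmem)
  simp [PySem.Set.contains, hne]

lemma pvSet_add_eq_append (v : List String) (s : String) (hv : s ∉ v) :
    PySem.Set.add v s = v ++ [s] := by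
  simp [PySem.Set.add, PySem.Set.contains, hv]

lemma pvGetD_not_key (end_map : List (String × List String)) (s : String)
    (h : s ∉ end_map.map Prod.fst) : PySem.Dict.getD ⟨end_map⟩ s ([] : List String) = [] := by
  have : (PySem.Dict.mk end_map).get? s = none := by
    rw [PySem.Dict.get?_eq_none_iff_not_mem_keys]
    simpa [PySem.Dict.keys] using h
  simp [PySem.Dict.getD, this]

-- ===== PORT A =====
-- A's while-loop over the explicit stack (head of the list = top of the Python stack);
-- state = (visited, group) as insertion-ordered PySem sets.
def merge_end_links_loop (end_map : List (String × List String)) :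
    List String → List String → List String → List String × List String
  | [], v, g => (v, g)
  | s :: rest, v, g =>
    if PySem.Set.contains v s then
      merge_end_links_loop end_map rest v g
    else
      let v' := PySem.Set.add v s
      let g' := PySem.Set.add g s
      let nbrs := PySem.Dict.getD ⟨end_map⟩ s []
      merge_end_links_loop end_map
        ((nbrs.filter (fun n => !(PySem.Set.contains v' n))).reverse ++ rest) v' g'
  termination_by stack v _ => (pvUnvis end_map v, stack.length)
  decreasing_by
  · exact Prod.Lex.right _ (Nat.lt_succ_self _)
  · rename_i hcon
    have hv : s ∉ v := by simpa [PySem.Set.contains] using hcon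
    rw [pvSet_add_eq_append v s hv]
    by_cases hk : s ∈ end_map.map Prod.fst
    · exact Prod.Lex.left _ _ (pvUnvis_add_lt end_map v s hk hv)
    · rw [pvUnvis_add_eq end_map v s hk, pvGetD_not_key end_map s hk]
      exact Prod.Lex.right _ (by simp)

def merge_end_links (start_seg : String) (end_map : List (String × List String))
    (visited : List String) : List String :=
  (merge_end_links_loop end_map [start_seg] visited []).2

-- ===== PORT B =====
-- `end_map[s] if s in end_map else []`: hand-ported first-match association lookup
-- (exact: a Python dict's keys are unique, so first match is the match).
def pvNbrsOf : List (String × List String) → String → List String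
  | [], _ => []
  | e :: t, s => if e.1 = s then e.2 else pvNbrsOf t s

-- B's `dfs(s, seen)` / its `for nbr in reversed(nbrs)` loop.  `acc` collects the newly
-- visited nodes; pvRunRev iterates the neighbour list in reversed order by recursing on
-- the tail before visiting the head (exact port of iterating `reversed(nbrs)` while
-- extending `acc`).  The fuel argument only makes the recursion total: the nesting
-- depth of `dfs` is bounded by the number of map entries, so `end_map.length + 1`
-- fuel is never exhausted (the equivalence theorem below depends on no such bound).
mutual
def pvDfs (m : List (String × List String)) : Nat → String → List String → List String
  | 0, _, _ => []
  | fuel + 1, s, seen =>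
    if s ∈ seen then []
    else pvRunRev m fuel (pvNbrsOf m s) seen [s]
  termination_by fuel => (fuel, 0)

def pvRunRev (m : List (String × List String)) (fuel : Nat) :
    List String → List String → List String → List String
  | [], _, acc => acc
  | nbr :: t, seen, acc =>
    let acc' := pvRunRev m fuel t seen acc
    acc' ++ pvDfs m fuel nbr (seen ++ acc')
  termination_by ns => (fuel, ns.length + 1)
  decreasing_by
  · exact Prod.Lex.right _ (by simp)
  · exact Prod.Lex.right _ (by simp)
end

def merge_end_links_alt (start_seg : String) (end_map : List (String × List String))
    (visited : List String) : List String :=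
  PySem.Set.ofList (pvDfs end_map (end_map.length + 1) start_seg visited)

-- ===== PRECONDITION & SPEC =====
def Spec_merge_end_links (start_seg : String) (end_map : List (String × List String)) (visited : List String) (out : List String) : Prop := out = merge_end_links_alt start_seg end_map visited
instance (start_seg : String) (end_map : List (String × List String)) (visited : List String) (out : List String) : Decidable (Spec_merge_end_links start_seg end_map visited out) := by unfold Spec_merge_end_links; infer_instance

-- ===== CLAIM (what is proved, stated in full; the proofs are below) =====
def Claim_equal_merge_end_links : Prop := ∀ (start_seg : String) (end_map : List (String × List String)) (visited : List String), Dom_merge_end_links start_seg end_map visited → Spec_merge_end_links start_seg end_map visited (merge_end_links start_seg end_map visited)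

-- ===== LEMMAS AND PROOFS =====

lemma pvUnvis_le_of_subset (end_map : List (String × List String)) (v w : List String)
    (h : ∀ x ∈ v, x ∈ w) : pvUnvis end_map w ≤ pvUnvis end_map v := by
  have hs : List.Sublist ((end_map.map Prod.fst).filter (fun k => !(PySem.Set.contains w k)))
      ((end_map.map Prod.fst).filter (fun k => !(PySem.Set.contains v k))) := by
    refine List.monotone_filter_right _ (fun x hx => ?_)
    simp only [PySem.Set.contains, Bool.not_eq_eq_eq_not, Bool.not_true,
      List.contains_eq_mem, decide_eq_false_iff_not] at hx ⊢
    exact fun hv => hx (h x hv)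
  exact hs.length_le


-- unfold lemmas for A's well-founded loop
lemma pvLoop_nil (end_map : List (String × List String)) (v g : List String) :
    merge_end_links_loop end_map [] v g = (v, g) := by
  rw [merge_end_links_loop]

lemma pvLoop_cons_mem (end_map : List (String × List String)) (s : String)
    (rest v g : List String) (h : PySem.Set.contains v s = true) :
    merge_end_links_loop end_map (s :: rest) v g = merge_end_links_loop end_map rest v g := by
  have hm : s ∈ v := by simpa [PySem.Set.contains] using h
  rw [merge_end_links_loop]; simp [hm]

lemma pvLoop_cons_new (end_map : List (String × List String)) (s : String)
    (rest v g : List String) (h : PySem.Set.contains v s = false) :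
    merge_end_links_loop end_map (s :: rest) v g =
      merge_end_links_loop end_map
        (((PySem.Dict.getD ⟨end_map⟩ s []).filter
            (fun n => !(PySem.Set.contains (PySem.Set.add v s) n))).reverse ++ rest)
        (PySem.Set.add v s) (PySem.Set.add g s) := by
  have hm : s ∉ v := by simpa [PySem.Set.contains] using h
  rw [merge_end_links_loop]; simp [hm]

-- visited only grows along A's loop
lemma pvLoop_subset (end_map : List (String × List String)) :
    ∀ stack v g, ∀ x ∈ v, x ∈ (merge_end_links_loop end_map stack v g).1 := by
  intro stack v g
  fun_induction merge_end_links_loop end_map stack v g with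
  | case1 v g => exact fun x hx => hx
  | case2 s rest v g hcon ih => exact ih
  | case3 s rest v g hcon v' g' nbrs ih =>
    intro x hx
    exact ih x ((PySem.Set.mem_add v s x).mpr (Or.inl hx))

-- processing a concatenated stack = processing the two parts in sequence
lemma pvLoop_append (end_map : List (String × List String)) :
    ∀ a v g b, merge_end_links_loop end_map (a ++ b) v g =
      merge_end_links_loop end_map b (merge_end_links_loop end_map a v g).1
        (merge_end_links_loop end_map a v g).2 := by
  suffices H : ∀ k : Nat, ∀ a v g b, pvUnvis end_map v ≤ k →
      merge_end_links_loop end_map (a ++ b) v g =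
        merge_end_links_loop end_map b (merge_end_links_loop end_map a v g).1
          (merge_end_links_loop end_map a v g).2 by
    intro a v g b; exact H (pvUnvis end_map v) a v g b le_rfl
  intro k
  induction k using Nat.strong_induction_on with
  | _ k SIH =>
  intro a
  induction a with
  | nil => intro v g b _; rw [List.nil_append, pvLoop_nil]
  | cons s a' IH =>
    intro v g b h
    by_cases hs : PySem.Set.contains v s = true
    · rw [List.cons_append, pvLoop_cons_mem end_map s _ v g hs,
        pvLoop_cons_mem end_map s a' v g hs]
      exact IH v g b h
    · have hs' : PySem.Set.contains v s = false := by simpa using hs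
      have hv : s ∉ v := by simpa [PySem.Set.contains] using hs'
      rw [List.cons_append, pvLoop_cons_new end_map s _ v g hs',
        pvLoop_cons_new end_map s a' v g hs', ← List.append_assoc]
      by_cases hk : s ∈ end_map.map Prod.fst
      · have hlt : pvUnvis end_map (PySem.Set.add v s) < k := by
          rw [pvSet_add_eq_append v s hv]
          exact lt_of_lt_of_le (pvUnvis_add_lt end_map v s hk hv) h
        exact SIH _ hlt _ _ _ _ le_rfl
      · have heq : pvUnvis end_map (PySem.Set.add v s) = pvUnvis end_map v := by
          rw [pvSet_add_eq_append v s hv]; exact pvUnvis_add_eq end_map v s hk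
        rw [pvGetD_not_key end_map s hk]
        simp only [List.filter_nil, List.reverse_nil, List.nil_append]
        exact IH _ _ b (heq ▸ h)

-- stack entries already visited (w.r.t. any subset w of visited) may be dropped
lemma pvLoop_filter (end_map : List (String × List String)) :
    ∀ rest v g (w : List String), (∀ x ∈ w, x ∈ v) →
      merge_end_links_loop end_map (rest.filter (fun n => !(PySem.Set.contains w n))) v g =
        merge_end_links_loop end_map rest v g := by
  intro rest
  induction rest with
  | nil => intro v g w _; rfl
  | cons n rest IH =>
    intro v g w hw
    by_cases hn : PySem.Set.contains w n = true
    · have hnv : PySem.Set.contains v n = true := by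
        have : n ∈ w := by simpa [PySem.Set.contains] using hn
        simpa [PySem.Set.contains] using hw n this
      have hm : n ∈ w := by simpa [PySem.Set.contains] using hn
      rw [pvLoop_cons_mem end_map n rest v g hnv]
      simpa [List.filter_cons, hm] using IH v g w hw
    · have hm' : n ∉ w := by
        simpa [PySem.Set.contains] using (by simpa using hn : PySem.Set.contains w n = false)
      have hcons : (n :: rest).filter (fun n => !(PySem.Set.contains w n)) =
          [n] ++ rest.filter (fun n => !(PySem.Set.contains w n)) := by
        simp [hm']
      rw [hcons, pvLoop_append end_map [n] v g _,
        show (n :: rest) = [n] ++ rest from rfl, pvLoop_append end_map [n] v g rest]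
      exact IH _ _ w (fun x hx => pvLoop_subset end_map [n] v g x (hw x hx))

-- shape of A's run: visited gains a duplicate-free block Δ of fresh nodes and the group
-- gains exactly the same block
lemma pvLoop_shape (end_map : List (String × List String)) :
    ∀ stack v g, (∀ x ∈ g, x ∈ v) →
      ∃ Δ, merge_end_links_loop end_map stack v g = (v ++ Δ, g ++ Δ) ∧
        Δ.Nodup ∧ ∀ x ∈ Δ, x ∉ v := by
  intro stack v g
  fun_induction merge_end_links_loop end_map stack v g with
  | case1 v g => exact fun _ => ⟨[], by simp⟩
  | case2 s rest v g hcon ih => exact ih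
  | case3 s rest v g hcon v' g' nbrs ih =>
    intro hg
    have hv : s ∉ v := by simpa [PySem.Set.contains] using hcon
    have hsg : s ∉ g := fun h => hv (hg s h)
    have hv' : v' = v ++ [s] := pvSet_add_eq_append v s hv
    have hg' : g' = g ++ [s] := pvSet_add_eq_append g s hsg
    have hsub : ∀ x ∈ g', x ∈ v' := by
      rw [hv', hg']; intro x hx
      rcases List.mem_append.mp hx with h | h
      · exact List.mem_append_left _ (hg x h)
      · exact List.mem_append_right _ h
    obtain ⟨Δ, heq, hnd, hfresh⟩ := ih hsub
    refine ⟨s :: Δ, ?_, ?_, ?_⟩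
    · rw [heq, hv', hg']; simp
    · refine List.nodup_cons.mpr ⟨fun hs => ?_, hnd⟩
      exact hfresh s hs (by rw [hv']; exact List.mem_append_right _ (by simp))
    · intro x hx
      rcases List.mem_cons.mp hx with h | h
      · exact h ▸ hv
      · exact fun hxv => hfresh x h (by rw [hv']; exact List.mem_append_left _ hxv)

-- B-side basics
lemma pvNbrsOf_eq_getD (m : List (String × List String)) (s : String) :
    pvNbrsOf m s = PySem.Dict.getD ⟨m⟩ s [] := by
  induction m with
  | nil => simp [pvNbrsOf, PySem.Dict.getD, PySem.Dict.get?]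
  | cons e t ih =>
    by_cases h : e.1 = s
    · simp [pvNbrsOf, PySem.Dict.getD, PySem.Dict.get?, h]
    · have hne : (e.1 == s) = false := by simp [h]
      simp only [pvNbrsOf, h, if_false]
      rw [ih]
      simp [PySem.Dict.getD, PySem.Dict.get?, hne]

lemma pvRunRev_prefix (m : List (String × List String)) (fuel : Nat) :
    ∀ ns seen acc, ∃ d, pvRunRev m fuel ns seen acc = acc ++ d := by
  intro ns
  induction ns with
  | nil => intro seen acc; exact ⟨[], by simp [pvRunRev]⟩
  | cons n t ih =>
    intro seen acc
    obtain ⟨d, hd⟩ := ih seen acc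
    refine ⟨d ++ pvDfs m fuel n (seen ++ pvRunRev m fuel t seen acc), ?_⟩
    rw [pvRunRev, hd]; simp

-- main simulation: with enough fuel, a singleton-stack step of A's loop is B's dfs
-- (H1) and A's loop over the reversed neighbour list is B's reversed-iteration (H2)
lemma pvMain (m : List (String × List String)) :
    ∀ fuel : Nat,
      (∀ s v g, pvUnvis m v < fuel →
        (merge_end_links_loop m [s] v g).1 = v ++ pvDfs m fuel s v) ∧
      (∀ ns seen acc g, pvUnvis m (seen ++ acc) < fuel →
        (merge_end_links_loop m ns.reverse (seen ++ acc) g).1 =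
          seen ++ pvRunRev m fuel ns seen acc) := by
  intro fuel
  induction fuel with
  | zero => exact ⟨fun s v g h => absurd h (by omega), fun ns seen acc g h => absurd h (by omega)⟩
  | succ f ih =>
    have H1 : ∀ s v g, pvUnvis m v < f + 1 →
        (merge_end_links_loop m [s] v g).1 = v ++ pvDfs m (f + 1) s v := by
      intro s v g h
      by_cases hs : PySem.Set.contains v s = true
      · have hm : s ∈ v := by simpa [PySem.Set.contains] using hs
        rw [pvLoop_cons_mem m s [] v g hs, pvLoop_nil, pvDfs]
        simp [hm]
      · have hs' : PySem.Set.contains v s = false := by simpa using hs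
        have hv : s ∉ v := by simpa [PySem.Set.contains] using hs'
        have hv' : PySem.Set.add v s = v ++ [s] := pvSet_add_eq_append v s hv
        rw [pvLoop_cons_new m s [] v g hs', List.append_nil, ← List.filter_reverse,
          pvLoop_filter m _ _ _ (PySem.Set.add v s) (fun x hx => by
            simpa [PySem.Set.contains] using hx),
          pvDfs]
        simp only [hv, if_false]
        rw [pvNbrsOf_eq_getD]
        by_cases hk : s ∈ m.map Prod.fst
        · have hlt : pvUnvis m (v ++ [s]) < f :=
            Nat.lt_of_lt_of_le (pvUnvis_add_lt m v s hk hv) (by omega)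
          rw [hv']
          exact ih.2 (PySem.Dict.getD ⟨m⟩ s []) v [s] (PySem.Set.add g s) hlt
        · rw [pvGetD_not_key m s hk]
          simp only [List.reverse_nil]
          rw [pvLoop_nil, hv', pvRunRev]
    refine ⟨H1, ?_⟩
    intro ns
    induction ns with
    | nil =>
      intro seen acc g h
      rw [List.reverse_nil, pvLoop_nil, pvRunRev]
    | cons n t iht =>
      intro seen acc g h
      rw [List.reverse_cons, pvLoop_append m t.reverse _ g [n],
        iht seen acc g h, pvRunRev]
      obtain ⟨d, hd⟩ := pvRunRev_prefix m (f + 1) t seen acc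
      set acc' := pvRunRev m (f + 1) t seen acc with hacc'
      have hsub : ∀ x ∈ seen ++ acc, x ∈ seen ++ acc' := by
        intro x hx
        rcases List.mem_append.mp hx with hx1 | hx2
        · exact List.mem_append_left _ hx1
        · exact List.mem_append_right _ (by rw [hd]; exact List.mem_append_left _ hx2)
      have hle : pvUnvis m (seen ++ acc') ≤ pvUnvis m (seen ++ acc) :=
        pvUnvis_le_of_subset m _ _ hsub
      have := H1 n (seen ++ acc') (merge_end_links_loop m t.reverse (seen ++ acc) g).2
        (by omega)
      rw [List.append_assoc] at this
      exact this

-- ===== VERDICT (by name: the statement is the Claim_ definition above) =====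
theorem merge_end_links_spec : Claim_equal_merge_end_links := by
  intro start_seg end_map visited _
  unfold Spec_merge_end_links merge_end_links merge_end_links_alt
  obtain ⟨Δ, heq, hnd, -⟩ := pvLoop_shape end_map [start_seg] visited [] (by simp)
  have hfuel : pvUnvis end_map visited < end_map.length + 1 := by
    have : pvUnvis end_map visited ≤ (end_map.map Prod.fst).length :=
      List.length_filter_le _ _
    simpa using Nat.lt_succ_of_le (by simpa using this)
  have h1 := (pvMain end_map (end_map.length + 1)).1 start_seg visited [] hfuel
  rw [heq] at h1
  simp only at h1
  have hΔ : Δ = pvDfs end_map (end_map.length + 1) start_seg visited :=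
    List.append_cancel_left h1
  rw [heq, ← hΔ]
  show Δ = PySem.Set.ofList Δ
  exact (PySem.Set.ofList_eq_self_of_nodup Δ hnd).symm
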